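-- pv_equiv track=rewrite | github.com/icjmaa/MySFTP | MySFTP.py | limpiarCadena
-- ===== SOURCE A (Python) =====
-- def limpiarCadena(texto):
-- 	ant = None
-- 	limpio = ""
-- 	for i in range(0,len(texto)):
-- 		if texto[i] == ant and texto[i] == ' ':
-- 			pass
-- 		else:
-- 			if texto[i] != '\r':
-- 				limpio = limpio + texto[i]
-- 		ant = texto[i]
-- 	return limpio
-- ===== SOURCE B (Python) =====
-- def limpiarCadena(texto):
--     piezas = []
--     i = 0
--     n = len(texto)
--     while i < n:
--         c = texto[i]
--         j = i
--         while j < n and texto[j] == c: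
--             j += 1
--         if c == '\r':
--             pass
--         elif c == ' ':
--             piezas.append(' ')
--         else:
--             piezas.append(texto[i:j])
--         i = j
--     return ''.join(piezas)
-- ===== Notes on version B (the rewrite author's own statement) =====
-- stated objective: alternative
-- what changed: Replaces the per-character previous-char state machine by a single pass over maximal runs of identical characters (skip a '\r' run, emit one space for a space run, emit other runs whole), collecting pieces and joining once.
import Mathlib
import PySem

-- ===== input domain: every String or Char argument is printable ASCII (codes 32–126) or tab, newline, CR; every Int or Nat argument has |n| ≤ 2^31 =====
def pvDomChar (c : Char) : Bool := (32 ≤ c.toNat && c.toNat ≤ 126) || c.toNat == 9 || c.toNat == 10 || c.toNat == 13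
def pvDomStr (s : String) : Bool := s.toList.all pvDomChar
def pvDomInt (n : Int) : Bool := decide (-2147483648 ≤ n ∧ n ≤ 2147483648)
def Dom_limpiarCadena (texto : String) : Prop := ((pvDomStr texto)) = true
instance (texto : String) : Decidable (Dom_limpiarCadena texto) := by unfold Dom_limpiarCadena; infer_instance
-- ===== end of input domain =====

-- B replaces A's previous-character state machine by a single pass over maximal runs
-- of identical characters (objective: alternative decomposition, same exact result).

-- ===== PORT A =====
-- A indexes texto[i] for i in range(0,len(texto)); indices are always in range, so
-- pyGetD with an arbitrary default is exact here. limpio is accumulated as List Char.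
def limpiarCadena (texto : String) : String :=
  let cs := texto.toList
  let st := (PySem.List.pyRange 0 (cs.length : Int) 1).foldl
    (fun (st : Option Char × List Char) i =>
      let c := PySem.List.pyGetD cs i ' '
      let limpio := if st.1 = some c ∧ c = ' ' then st.2
                    else if c ≠ '\r' then st.2 ++ [c] else st.2
      (some c, limpio)) ((none : Option Char), ([] : List Char))
  String.ofList st.2

-- ===== PORT B =====
-- run-grouping pass: take the maximal run of the head character, emit its piece, recurse
def altGo : List Char → List Char
  | [] => []
  | c :: rest =>
    (if c = '\r' then [] else if c = ' ' then [' '] else c :: rest.takeWhile (· == c))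
      ++ altGo (rest.dropWhile (· == c))
termination_by l => l.length
decreasing_by
  simp only [List.length_cons]
  exact Nat.lt_succ_of_le (List.length_dropWhile_le _ _)

def limpiarCadena_alt (texto : String) : String := String.ofList (altGo texto.toList)

-- ===== PRECONDITION & SPEC =====
def Spec_limpiarCadena (texto : String) (out : String) : Prop := out = limpiarCadena_alt texto
instance (texto : String) (out : String) : Decidable (Spec_limpiarCadena texto out) := by unfold Spec_limpiarCadena; infer_instance

-- ===== CLAIM (what is proved, stated in full; the proofs are below) =====
def Claim_equal_limpiarCadena : Prop := ∀ (texto : String), Dom_limpiarCadena texto → Spec_limpiarCadena texto (limpiarCadena texto)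

-- ===== LEMMAS AND PROOFS =====

-- A's loop as a structural recursion carrying the previous character
def goA (ant : Option Char) : List Char → List Char
  | [] => []
  | c :: rest =>
    (if ant = some c ∧ c = ' ' then [] else if c ≠ '\r' then [c] else [])
      ++ goA (some c) rest

theorem foldl_goA (cs : List Char) : ∀ (ant : Option Char) (acc : List Char),
    (cs.foldl (fun (st : Option Char × List Char) c =>
      (some c, if st.1 = some c ∧ c = ' ' then st.2
               else if c ≠ '\r' then st.2 ++ [c] else st.2)) (ant, acc)).2
      = acc ++ goA ant cs := by
  induction cs with
  | nil => intro ant acc; simp [goA]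
  | cons c rest ih =>
    intro ant acc
    simp only [List.foldl_cons, goA, ih]
    split_ifs <;> simp

-- the previous character is irrelevant once the head differs from it
theorem goA_ne (c : Char) (t : List Char) (h : t.head? ≠ some c) :
    goA (some c) t = goA none t := by
  cases t with
  | nil => rfl
  | cons h' t' =>
    have hne : h' ≠ c := by simpa using h
    simp [goA, hne.symm]

-- a run of copies of c after ant = some c contributes the run itself unless c is ' ' or '\r'
theorem goA_run (c : Char) (run : List Char) (hrun : ∀ x ∈ run, x = c) (rest : List Char) :
    goA (some c) (run ++ rest)
      = (if c = '\r' ∨ c = ' ' then [] else run) ++ goA (some c) rest := by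
  induction run with
  | nil => simp
  | cons x xs ih =>
    have hx : x = c := hrun x (by simp)
    subst hx
    have : ∀ y ∈ xs, y = x := fun y hy => hrun y (by simp [hy])
    simp only [List.cons_append, goA, ih this]
    by_cases h1 : x = '\r' <;> by_cases h2 : x = ' ' <;> simp [h1, h2]

theorem goA_eq_altGo (n : ℕ) : ∀ (cs : List Char), cs.length ≤ n → goA none cs = altGo cs := by
  induction n with
  | zero =>
    intro cs h
    have : cs = [] := List.eq_nil_of_length_eq_zero (Nat.le_zero.mp h)
    subst this; simp [goA, altGo]
  | succ n ih =>
    intro cs h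
    cases cs with
    | nil => simp [goA, altGo]
    | cons c rest =>
      have hsplit : rest = rest.takeWhile (· == c) ++ rest.dropWhile (· == c) :=
        (List.takeWhile_append_dropWhile).symm
      have hrun : ∀ x ∈ rest.takeWhile (· == c), x = c := by
        intro x hx
        have := List.mem_takeWhile_imp hx
        simpa using this
      have hhead : (rest.dropWhile (· == c)).head? ≠ some c := by
        intro hc
        have := List.head?_dropWhile_not (p := (· == c)) (l := rest)
        rw [hc] at this
        simp at this
      have hlen : (rest.dropWhile (· == c)).length ≤ n := by
        have h1 : (rest.dropWhile (· == c)).length ≤ rest.length :=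
          List.length_dropWhile_le _ _
        have h2 : rest.length ≤ n := by simpa using Nat.lt_succ_iff.mp (Nat.lt_of_lt_of_le (by simp) h)
        omega
      have hrec : goA (some c) rest
          = (if c = '\r' ∨ c = ' ' then [] else rest.takeWhile (· == c))
              ++ altGo (rest.dropWhile (· == c)) := by
        calc goA (some c) rest
            = goA (some c) (rest.takeWhile (· == c) ++ rest.dropWhile (· == c)) := by
              rw [← hsplit]
          _ = (if c = '\r' ∨ c = ' ' then [] else rest.takeWhile (· == c))
                ++ goA (some c) (rest.dropWhile (· == c)) := goA_run c _ hrun _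
          _ = _ := by rw [goA_ne c _ hhead, ih _ hlen]
      simp only [goA, altGo, hrec]
      by_cases h1 : c = '\r' <;> by_cases h2 : c = ' ' <;> simp [h1, h2]

-- ===== VERDICT (by name: the statement is the Claim_ definition above) =====
theorem limpiarCadena_spec : Claim_equal_limpiarCadena := by
  intro texto _
  unfold Spec_limpiarCadena limpiarCadena limpiarCadena_alt
  simp only []
  rw [PySem.List.foldl_pyRange_zero_pyGetD' texto.toList ' '
      (fun (st : Option Char × List Char) c =>
        (some c, if st.1 = some c ∧ c = ' ' then st.2
                 else if c ≠ '\r' then st.2 ++ [c] else st.2)) (none, [])]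
  rw [foldl_goA, goA_eq_altGo texto.toList.length texto.toList (le_refl _)]
  simp
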